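-- pv_equiv track=rewrite | github.com/nihilus/tree-cbass | SourceCode/trunk/TREE/dispatcher/core/structures/Analyzer/x86ISA.py | getNormalizedX86RegisterNames
-- ===== SOURCE A (Python) =====
-- def getNormalizedX86RegisterNames(regname, width_bytes, tid):
--     normalizedNames = []
--     if (regname.lower() =="eax"):
--         for i in range(int(width_bytes)):
--             normalizedNames.append("eax_"+str(i)+"_"+str(tid))
--     elif (regname.lower() =="al"):
--         normalizedNames.append("eax_0"+"_"+str(tid))
--     elif (regname.lower() =="ah"):
--         normalizedNames.append("eax_1"+"_"+str(tid))
--     elif (regname.lower() =="ax"):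
--         normalizedNames.append("eax_0"+"_"+str(tid))
--         normalizedNames.append("eax_1"+"_"+str(tid))
--     elif (regname.lower() =="ebx"):
--         for i in range(int(width_bytes)):
--             normalizedNames.append("ebx_"+str(i)+"_"+str(tid))
--     elif (regname.lower() =="bl"):
--         normalizedNames.append("ebx_0"+"_"+str(tid))
--     elif (regname.lower() =="bh"):
--         normalizedNames.append("ebx_1"+"_"+str(tid))
--     elif (regname.lower() =="bx"):
--         normalizedNames.append("ebx_0"+"_"+str(tid))
--         normalizedNames.append("ebx_1"+"_"+str(tid))
--     elif (regname.lower() =="ecx"):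
--         for i in range(int(width_bytes)):
--             normalizedNames.append("ecx_"+str(i)+"_"+str(tid))
--     elif (regname.lower() =="cl"):
--         normalizedNames.append("ecx_0"+"_"+str(tid))
--     elif (regname.lower() =="ch"):
--         normalizedNames.append("ecx_1"+"_"+str(tid))
--     elif (regname.lower() =="cx"):
--         normalizedNames.append("ecx_0"+"_"+str(tid))
--         normalizedNames.append("ecx_1"+"_"+str(tid))
--     elif (regname.lower() =="edx"):
--         for i in range(int(width_bytes)):
--             normalizedNames.append("edx_"+str(i)+"_"+str(tid))
--     elif (regname.lower() =="dl"):
--         normalizedNames.append("edx_0"+"_"+str(tid))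
--     elif (regname.lower() =="dh"):
--         normalizedNames.append("edx_1"+"_"+str(tid))
--     elif (regname.lower() =="dx"):
--         normalizedNames.append("edx_0"+"_"+str(tid))
--         normalizedNames.append("edx_1"+"_"+str(tid))
--     elif (regname.lower() =="bp"):
--         normalizedNames.append("ebp_0"+"_"+str(tid))
--         normalizedNames.append("ebp_1"+"_"+str(tid))
--     else:
--         sDbg ="getNormalizedX86RegisterNames: regName = %s" %str(regname.lower())
--
--         for i in range(int(width_bytes)):
--             normalizedNames.append(str(regname.lower())+"_"+str(i)+"_"+str(tid))
--     return normalizedNames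
-- ===== SOURCE B (Python) =====
-- _X86_BYTE_TABLE = {
--     "al": ("eax", [0]), "ah": ("eax", [1]), "ax": ("eax", [0, 1]),
--     "bl": ("ebx", [0]), "bh": ("ebx", [1]), "bx": ("ebx", [0, 1]),
--     "cl": ("ecx", [0]), "ch": ("ecx", [1]), "cx": ("ecx", [0, 1]),
--     "dl": ("edx", [0]), "dh": ("edx", [1]), "dx": ("edx", [0, 1]),
--     "bp": ("ebp", [0, 1]),
-- }
--
-- def getNormalizedX86RegisterNames(regname, width_bytes, tid):
--     name = regname.lower()
--     if name in _X86_BYTE_TABLE: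
--         base, indices = _X86_BYTE_TABLE[name]
--     else:
--         base, indices = name, range(int(width_bytes))
--     return [base + "_" + str(i) + "_" + str(tid) for i in indices]
-- ===== Notes on version B (the rewrite author's own statement) =====
-- stated objective: simpler
-- what changed: Replaced the 17-branch if/elif chain (each branch hand-building its own list) by a static table mapping sub-register names to a (base, byte-index-list) pair plus one uniform list-comprehension pass that also covers the full-register and default cases.
import Mathlib
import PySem

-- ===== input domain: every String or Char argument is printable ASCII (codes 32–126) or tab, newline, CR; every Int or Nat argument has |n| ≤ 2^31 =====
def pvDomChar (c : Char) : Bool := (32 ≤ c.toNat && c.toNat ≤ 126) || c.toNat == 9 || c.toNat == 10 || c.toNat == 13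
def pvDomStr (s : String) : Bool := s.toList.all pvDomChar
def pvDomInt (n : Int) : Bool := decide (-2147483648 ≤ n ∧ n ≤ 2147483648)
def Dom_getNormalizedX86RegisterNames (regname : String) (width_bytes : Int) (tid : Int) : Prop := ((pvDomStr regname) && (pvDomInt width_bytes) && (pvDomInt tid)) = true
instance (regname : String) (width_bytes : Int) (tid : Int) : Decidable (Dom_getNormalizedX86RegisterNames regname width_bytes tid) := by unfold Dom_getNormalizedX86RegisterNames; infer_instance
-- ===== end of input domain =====

-- B replaces A's 17-branch if/elif chain by a static (base, byte-indices) table plus one uniform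
-- name-building pass (objective: simpler). Equivalence of the return values is proved on all inputs.

-- ===== PORT A =====
-- literal transliteration of A's if/elif chain; int(width_bytes) is the identity on an int,
-- and the dead local `sDbg` of the else-branch is omitted (it does not affect the result)
def getNormalizedX86RegisterNames (regname : String) (width_bytes : Int) (tid : Int) : List String :=
  if PySem.Str.lower regname == "eax" then
    (PySem.List.pyRange 0 width_bytes 1).foldl
      (fun acc i => acc ++ ["eax_" ++ PySem.Int.toStr i ++ "_" ++ PySem.Int.toStr tid]) []
  else if PySem.Str.lower regname == "al" then ["eax_0" ++ "_" ++ PySem.Int.toStr tid]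
  else if PySem.Str.lower regname == "ah" then ["eax_1" ++ "_" ++ PySem.Int.toStr tid]
  else if PySem.Str.lower regname == "ax" then
    ["eax_0" ++ "_" ++ PySem.Int.toStr tid, "eax_1" ++ "_" ++ PySem.Int.toStr tid]
  else if PySem.Str.lower regname == "ebx" then
    (PySem.List.pyRange 0 width_bytes 1).foldl
      (fun acc i => acc ++ ["ebx_" ++ PySem.Int.toStr i ++ "_" ++ PySem.Int.toStr tid]) []
  else if PySem.Str.lower regname == "bl" then ["ebx_0" ++ "_" ++ PySem.Int.toStr tid]
  else if PySem.Str.lower regname == "bh" then ["ebx_1" ++ "_" ++ PySem.Int.toStr tid]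
  else if PySem.Str.lower regname == "bx" then
    ["ebx_0" ++ "_" ++ PySem.Int.toStr tid, "ebx_1" ++ "_" ++ PySem.Int.toStr tid]
  else if PySem.Str.lower regname == "ecx" then
    (PySem.List.pyRange 0 width_bytes 1).foldl
      (fun acc i => acc ++ ["ecx_" ++ PySem.Int.toStr i ++ "_" ++ PySem.Int.toStr tid]) []
  else if PySem.Str.lower regname == "cl" then ["ecx_0" ++ "_" ++ PySem.Int.toStr tid]
  else if PySem.Str.lower regname == "ch" then ["ecx_1" ++ "_" ++ PySem.Int.toStr tid]
  else if PySem.Str.lower regname == "cx" then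
    ["ecx_0" ++ "_" ++ PySem.Int.toStr tid, "ecx_1" ++ "_" ++ PySem.Int.toStr tid]
  else if PySem.Str.lower regname == "edx" then
    (PySem.List.pyRange 0 width_bytes 1).foldl
      (fun acc i => acc ++ ["edx_" ++ PySem.Int.toStr i ++ "_" ++ PySem.Int.toStr tid]) []
  else if PySem.Str.lower regname == "dl" then ["edx_0" ++ "_" ++ PySem.Int.toStr tid]
  else if PySem.Str.lower regname == "dh" then ["edx_1" ++ "_" ++ PySem.Int.toStr tid]
  else if PySem.Str.lower regname == "dx" then
    ["edx_0" ++ "_" ++ PySem.Int.toStr tid, "edx_1" ++ "_" ++ PySem.Int.toStr tid]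
  else if PySem.Str.lower regname == "bp" then
    ["ebp_0" ++ "_" ++ PySem.Int.toStr tid, "ebp_1" ++ "_" ++ PySem.Int.toStr tid]
  else
    (PySem.List.pyRange 0 width_bytes 1).foldl
      (fun acc i => acc ++ [PySem.Str.lower regname ++ "_" ++ PySem.Int.toStr i ++ "_" ++ PySem.Int.toStr tid]) []

-- ===== PORT B =====
-- the static table _X86_BYTE_TABLE of Source B (dict → association list in insertion order)
def x86ByteTable : PySem.Dict String (String × List Int) :=
  PySem.Dict.ofList [("al", ("eax", [0])), ("ah", ("eax", [1])), ("ax", ("eax", [0, 1])),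
   ("bl", ("ebx", [0])), ("bh", ("ebx", [1])), ("bx", ("ebx", [0, 1])),
   ("cl", ("ecx", [0])), ("ch", ("ecx", [1])), ("cx", ("ecx", [0, 1])),
   ("dl", ("edx", [0])), ("dh", ("edx", [1])), ("dx", ("edx", [0, 1])),
   ("bp", ("ebp", [0, 1]))]

def getNormalizedX86RegisterNames_alt (regname : String) (width_bytes : Int) (tid : Int) : List String :=
  let name := PySem.Str.lower regname
  let p := match PySem.Dict.get? x86ByteTable name with
           | some q => q
           | none => (name, PySem.List.pyRange 0 width_bytes 1)
  p.2.map (fun i => p.1 ++ "_" ++ PySem.Int.toStr i ++ "_" ++ PySem.Int.toStr tid)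

-- ===== PRECONDITION & SPEC =====
def Spec_getNormalizedX86RegisterNames (regname : String) (width_bytes : Int) (tid : Int) (out : List String) : Prop := out = getNormalizedX86RegisterNames_alt regname width_bytes tid
instance (regname : String) (width_bytes : Int) (tid : Int) (out : List String) : Decidable (Spec_getNormalizedX86RegisterNames regname width_bytes tid out) := by unfold Spec_getNormalizedX86RegisterNames; infer_instance

-- ===== CLAIM (what is proved, stated in full; the proofs are below) =====
def Claim_equal_getNormalizedX86RegisterNames : Prop := ∀ (regname : String) (width_bytes : Int) (tid : Int), Dom_getNormalizedX86RegisterNames regname width_bytes tid → Spec_getNormalizedX86RegisterNames regname width_bytes tid (getNormalizedX86RegisterNames regname width_bytes tid)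

-- ===== LEMMAS AND PROOFS =====

theorem pv_flatten_singleton {a b : Type} (f : a -> b) (l : List a) :
    (l.map (fun x => [f x])).flatten = l.map f := by
  induction l with
  | nil => simp
  | cons x xs ih => simp [ih]

theorem pv_get_none (r : String) (h2 : ¬ r = "al") (h3 : ¬ r = "ah") (h4 : ¬ r = "ax")
    (h6 : ¬ r = "bl") (h7 : ¬ r = "bh") (h8 : ¬ r = "bx")
    (h10 : ¬ r = "cl") (h11 : ¬ r = "ch") (h12 : ¬ r = "cx")
    (h14 : ¬ r = "dl") (h15 : ¬ r = "dh") (h16 : ¬ r = "dx") (h17 : ¬ r = "bp") :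
    PySem.Dict.get? x86ByteTable r = none := by
  have htab : x86ByteTable = PySem.Dict.mk
    [("al", ("eax", [0])), ("ah", ("eax", [1])), ("ax", ("eax", [0, 1])),
     ("bl", ("ebx", [0])), ("bh", ("ebx", [1])), ("bx", ("ebx", [0, 1])),
     ("cl", ("ecx", [0])), ("ch", ("ecx", [1])), ("cx", ("ecx", [0, 1])),
     ("dl", ("edx", [0])), ("dh", ("edx", [1])), ("dx", ("edx", [0, 1])),
     ("bp", ("ebp", [0, 1]))] := by decide
  simp [htab, PySem.Dict.get?,
        Ne.symm h2, Ne.symm h3, Ne.symm h4, Ne.symm h6, Ne.symm h7, Ne.symm h8,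
        Ne.symm h10, Ne.symm h11, Ne.symm h12, Ne.symm h14, Ne.symm h15, Ne.symm h16, Ne.symm h17]

theorem pv_main (regname : String) (width_bytes : Int) (tid : Int) :
    getNormalizedX86RegisterNames regname width_bytes tid
      = getNormalizedX86RegisterNames_alt regname width_bytes tid := by
  unfold getNormalizedX86RegisterNames getNormalizedX86RegisterNames_alt
  generalize PySem.Str.lower regname = r
  by_cases h1 : r = "eax"
  · subst h1
    simp [show PySem.Dict.get? x86ByteTable "eax" = none from by decide]
    all_goals rw [pv_flatten_singleton]
  by_cases h2 : r = "al"
  · subst h2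
    simp [show PySem.Dict.get? x86ByteTable "al" = some ("eax", [0]) from by decide]
    all_goals decide
  by_cases h3 : r = "ah"
  · subst h3
    simp [show PySem.Dict.get? x86ByteTable "ah" = some ("eax", [1]) from by decide]
    all_goals decide
  by_cases h4 : r = "ax"
  · subst h4
    simp [show PySem.Dict.get? x86ByteTable "ax" = some ("eax", [0, 1]) from by decide]
    all_goals decide
  by_cases h5 : r = "ebx"
  · subst h5
    simp [show PySem.Dict.get? x86ByteTable "ebx" = none from by decide]
    all_goals rw [pv_flatten_singleton]
  by_cases h6 : r = "bl"
  · subst h6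
    simp [show PySem.Dict.get? x86ByteTable "bl" = some ("ebx", [0]) from by decide]
    all_goals decide
  by_cases h7 : r = "bh"
  · subst h7
    simp [show PySem.Dict.get? x86ByteTable "bh" = some ("ebx", [1]) from by decide]
    all_goals decide
  by_cases h8 : r = "bx"
  · subst h8
    simp [show PySem.Dict.get? x86ByteTable "bx" = some ("ebx", [0, 1]) from by decide]
    all_goals decide
  by_cases h9 : r = "ecx"
  · subst h9
    simp [show PySem.Dict.get? x86ByteTable "ecx" = none from by decide]
    all_goals rw [pv_flatten_singleton]
  by_cases h10 : r = "cl"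
  · subst h10
    simp [show PySem.Dict.get? x86ByteTable "cl" = some ("ecx", [0]) from by decide]
    all_goals decide
  by_cases h11 : r = "ch"
  · subst h11
    simp [show PySem.Dict.get? x86ByteTable "ch" = some ("ecx", [1]) from by decide]
    all_goals decide
  by_cases h12 : r = "cx"
  · subst h12
    simp [show PySem.Dict.get? x86ByteTable "cx" = some ("ecx", [0, 1]) from by decide]
    all_goals decide
  by_cases h13 : r = "edx"
  · subst h13
    simp [show PySem.Dict.get? x86ByteTable "edx" = none from by decide]
    all_goals rw [pv_flatten_singleton]
  by_cases h14 : r = "dl"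
  · subst h14
    simp [show PySem.Dict.get? x86ByteTable "dl" = some ("edx", [0]) from by decide]
    all_goals decide
  by_cases h15 : r = "dh"
  · subst h15
    simp [show PySem.Dict.get? x86ByteTable "dh" = some ("edx", [1]) from by decide]
    all_goals decide
  by_cases h16 : r = "dx"
  · subst h16
    simp [show PySem.Dict.get? x86ByteTable "dx" = some ("edx", [0, 1]) from by decide]
    all_goals decide
  by_cases h17 : r = "bp"
  · subst h17
    simp [show PySem.Dict.get? x86ByteTable "bp" = some ("ebp", [0, 1]) from by decide]
    all_goals decide
  · simp [h1, h2, h3, h4, h5, h6, h7, h8, h9, h10, h11, h12, h13, h14, h15, h16, h17,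
          pv_get_none r h2 h3 h4 h6 h7 h8 h10 h11 h12 h14 h15 h16 h17]
    all_goals rw [pv_flatten_singleton]

-- ===== VERDICT (by name: the statement is the Claim_ definition above) =====
theorem getNormalizedX86RegisterNames_spec : Claim_equal_getNormalizedX86RegisterNames := by
  intro regname width_bytes tid _
  exact pv_main regname width_bytes tid
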